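-- pv_equiv track=rewrite | github.com/Tsignorino/OJ_Code | Problems/Leetcode/3001-4000/3301-3400/3331.py | findSubtreeSizes
-- ===== SOURCE A (Python) =====
-- from collections import defaultdict
-- from typing import List
--
-- def findSubtreeSizes(parent: List[int], s: str) -> List[int]:
--     n = len(parent)
--     g = [[] for _ in range(n)]
--     for i in range(1, n):
--         g[parent[i]].append(i)
--
--     # 维护每个字符的祖先节点
--     """
--     一次 DFS
--     """
--     ans = [1] * n
--     ch = defaultdict(lambda: -1)
--
--     def dfs(x: int):
--         pre = ch[s[x]]
--         ch[s[x]] = x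
--         for y in g[x]:
--             dfs(y)
--             res = ch[s[y]]
--             ans[x if res < 0 else res] += ans[y]
--         ch[s[x]] = pre
--
--     dfs(0)
--     return ans
--
--     """
--     两次 DFS
--     """
--     ch = [-1] * 26
--
--     def rebuild(x: int):
--         idx = ord(s[x]) - ord("a")
--         pre = ch[idx]
--         ch[idx] = x
--         for i in range(len(g[x])):
--             y = g[x][i]
--             pa = ch[ord(s[y]) - ord("a")]
--             if pa != -1:
--                 g[pa].append(y)
--                 g[x][i] = -1
--             rebuild(y)
--         ch[idx] = pre
--
--     rebuild(0)
--
--     ans = [1] * n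
--
--     def dfs(x: int):
--         for y in g[x]:
--             if y != -1:
--                 dfs(y)
--                 ans[x] += ans[y]
--
--     dfs(0)
--     return ans
-- ===== SOURCE B (Python) =====
-- def findSubtreeSizes(parent, s):
--     n = len(parent)
--     g = [[] for _ in range(n)]
--     for i in range(1, n):
--         g[parent[i]].append(i)
--     ans = [1] * n
--     ch = {}
--     # explicit-stack DFS: frames (is_exit, node, saved_previous_holder)
--     stack = [(False, 0, -1)]
--     while stack:
--         isexit, x, pre = stack.pop()
--         if not isexit:
--             c = s[x]
--             pre = ch.get(c, -1)
--             ch[c] = x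
--             stack.append((True, x, pre))
--             for y in reversed(g[x]):
--                 stack.append((False, y, -1))
--         else:
--             ch[s[x]] = pre
--             if x:
--                 ans[parent[x] if pre < 0 else pre] += ans[x]
--     return ans
-- ===== Notes on version B (the rewrite author's own statement) =====
-- stated objective: alternative
-- what changed: Replaces A's recursive DFS (per-character save/restore around each recursive call, re-reading the dict after each child returns) by an iterative explicit-stack traversal whose exit frames carry the saved previous same-character holder, so each subtree is credited at its own exit frame from the saved value instead of a post-recursion dict read.
import Mathlib
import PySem

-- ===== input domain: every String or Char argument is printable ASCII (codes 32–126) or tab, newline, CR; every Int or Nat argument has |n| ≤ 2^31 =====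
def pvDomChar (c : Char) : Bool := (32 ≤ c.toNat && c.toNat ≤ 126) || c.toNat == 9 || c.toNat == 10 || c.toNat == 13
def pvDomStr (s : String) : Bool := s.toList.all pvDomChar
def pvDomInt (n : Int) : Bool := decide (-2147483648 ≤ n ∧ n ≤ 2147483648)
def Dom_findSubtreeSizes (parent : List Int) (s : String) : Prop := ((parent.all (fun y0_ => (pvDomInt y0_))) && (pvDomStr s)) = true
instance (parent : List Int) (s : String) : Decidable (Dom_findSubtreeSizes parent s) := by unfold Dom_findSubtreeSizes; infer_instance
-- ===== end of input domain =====

-- B replaces A's recursive DFS by an iterative explicit-stack traversal whose exit frames carry the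
-- saved previous same-char holder, crediting each subtree at its own exit from the saved value
-- instead of re-reading the dict after each child's recursive call (objective: alternative).

-- ===== PORT A =====
-- Python's negative list index wraps by +len; exact for -len ≤ p < len (Pre_ guarantees that
-- wherever an index is used); shared by both ports, Pre_ and the build loop
def pvNp (parent : List Int) (j : Nat) : Nat :=
  (if parent.getD j 0 < 0 then parent.getD j 0 + parent.length else parent.getD j 0).toNat

-- both Pythons build the child-list table g with the identical loop; shared helper
def pvBuildG (parent : List Int) : List (List Int) :=
  (PySem.List.pyRange 1 (parent.length : Int) 1).foldl
    (fun g i => g.modify (pvNp parent i.toNat) (fun l => l ++ [i]))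
    (List.replicate parent.length ([] : List Int))

-- the recursive dfs of A; fuel = remaining recursion depth (n at the root suffices under Pre_,
-- since the depth of any node reachable from the root is < n)
def pvDfsA (g : List (List Int)) (cs : List Char) :
    Nat → Nat → PySem.Dict Char Int × List Int → PySem.Dict Char Int × List Int
  | 0, _, st => st
  | fuel+1, x, st =>
    let c := cs.getD x ' '
    let pre := PySem.Dict.getD st.1 c (-1)
    let st2 := (g.getD x []).foldl
      (fun st y =>
        let st1 := pvDfsA g cs fuel y.toNat st
        let res := PySem.Dict.getD st1.1 (cs.getD y.toNat ' ') (-1)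
        let tgt := if res < 0 then x else res.toNat
        (st1.1, st1.2.set tgt (st1.2.getD tgt 0 + st1.2.getD y.toNat 0)))
      (PySem.Dict.insert st.1 c (Int.ofNat x), st.2)
    (PySem.Dict.insert st2.1 c pre, st2.2)

def findSubtreeSizes (parent : List Int) (s : String) : List Int :=
  let n := parent.length
  (pvDfsA (pvBuildG parent) s.toList n 0 (PySem.Dict.empty, List.replicate n (1 : Int))).2

-- ===== PORT B =====
-- the while-loop over the explicit stack; frames (is_exit, node, saved_previous_holder);
-- the Python stack's top (list end) is the Lean list head, so Python's
-- "append exit frame, then append the children reversed" is "children in order, then the exit frame";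
-- Python's ans[parent[x]] (negative index wraps) is ans[pvNp parent x]
def pvLoopB (g : List (List Int)) (cs : List Char) (parent : List Int) :
    Nat → List (Bool × Int × Int) → PySem.Dict Char Int → List Int → List Int
  | 0, _, _, ans => ans
  | _+1, [], _, ans => ans
  | fuel+1, (isexit, x, pre) :: rest, ch, ans =>
    if isexit = false then
      let c := cs.getD x.toNat ' '
      let pre' := PySem.Dict.getD ch c (-1)
      pvLoopB g cs parent fuel
        (((g.getD x.toNat []).map (fun y => ((false : Bool), y, (-1 : Int)))) ++
          ((true : Bool), x, pre') :: rest)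
        (PySem.Dict.insert ch c x) ans
    else
      let c := cs.getD x.toNat ' '
      let ans1 :=
        if x ≠ 0 then
          let tgt := if pre < 0 then pvNp parent x.toNat else pre.toNat
          ans.set tgt (ans.getD tgt 0 + ans.getD x.toNat 0)
        else ans
      pvLoopB g cs parent fuel rest (PySem.Dict.insert ch c pre) ans1

def findSubtreeSizes_alt (parent : List Int) (s : String) : List Int :=
  let n := parent.length
  -- fuel: (2n+3)^n strictly exceeds the number of loop iterations (lemma pvSIM below);
  -- the loop exits through the empty-stack case exactly as the Python 'while stack' does
  pvLoopB (pvBuildG parent) s.toList parent ((2 * n + 3) ^ n)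
    [((false : Bool), 0, -1)] PySem.Dict.empty (List.replicate n (1 : Int))

-- ===== PRECONDITION & SPEC =====
-- node j is visited by the dfs iff iterating the (wraparound-normalized) parent map from j
-- reaches the root 0; a shortest such chain has distinct nodes, so ≤ n steps always suffice
def pvReaches (parent : List Int) (j : Nat) : Bool :=
  (List.range (parent.length + 1)).any (fun k => (pvNp parent)^[k] j == 0)

-- Pre_ excludes exactly the inputs on which A raises: empty parent (IndexError at dfs(0)),
-- a parent[i] outside [-n, n) for some i ≥ 1 (IndexError building g), or a node reachable
-- from the root whose index is ≥ len(s) (IndexError on s[x]); everywhere A returns, Pre_ holds.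
def Pre_findSubtreeSizes (parent : List Int) (s : String) : Prop :=
  parent ≠ [] ∧
    (∀ i : Nat, i < parent.length → 1 ≤ i →
      -(parent.length : Int) ≤ parent.getD i 0 ∧ parent.getD i 0 < (parent.length : Int)) ∧
    (∀ j : Nat, j < parent.length → pvReaches parent j = true → j < s.length)
instance (parent : List Int) (s : String) : Decidable (Pre_findSubtreeSizes parent s) := by
  unfold Pre_findSubtreeSizes; infer_instance

-- a tree with a child index smaller than its parent's, a negative (wrapping) parent entry,
-- and an unreachable two-node cycle left at size 1 by both programs
def pvWitness_findSubtreeSizes : List Int × String := ([5, -2, 0, 1, 3], "abcab")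

def Spec_findSubtreeSizes (parent : List Int) (s : String) (out : List Int) : Prop := out = findSubtreeSizes_alt parent s
instance (parent : List Int) (s : String) (out : List Int) : Decidable (Spec_findSubtreeSizes parent s out) := by unfold Spec_findSubtreeSizes; infer_instance

-- ===== CLAIM (what is proved, stated in full; the proofs are below) =====
def Claim_equal_findSubtreeSizes : Prop := ∀ (parent : List Int) (s : String), Dom_findSubtreeSizes parent s → Pre_findSubtreeSizes parent s → Spec_findSubtreeSizes parent s (findSubtreeSizes parent s)

-- ===== LEMMAS AND PROOFS =====

theorem pvLoopB_nil (g : List (List Int)) (cs : List Char) (parent : List Int)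
    (f : Nat) (ch : PySem.Dict Char Int) (ans : List Int) :
    pvLoopB g cs parent f [] ch ans = ans := by
  cases f <;> simp [pvLoopB]

theorem pvNp_lt (parent : List Int)
    (Hp : ∀ i : Nat, i < parent.length → 1 ≤ i →
      -(parent.length : Int) ≤ parent.getD i 0 ∧ parent.getD i 0 < (parent.length : Int))
    (j : Nat) (hj1 : 1 ≤ j) (hjn : j < parent.length) :
    pvNp parent j < parent.length := by
  have h := Hp j hjn hj1
  unfold pvNp
  split <;> omega

theorem pvReaches_imp (parent : List Int) (x : Nat) (h : pvReaches parent x = true) :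
    ∃ k, (pvNp parent)^[k] x = 0 := by
  unfold pvReaches at h
  simp only [List.any_eq_true, List.mem_range, beq_iff_eq] at h
  obtain ⟨k, _, hk⟩ := h
  exact ⟨k, hk⟩

-- distance to the root along the normalized-parent chain (length of the shortest chain)
def pvDist (parent : List Int) (x : Nat) : Nat :=
  if h : pvReaches parent x = true then Nat.find (pvReaches_imp parent x h) else 0

theorem pvReaches_zero (parent : List Int) : pvReaches parent 0 = true := by
  unfold pvReaches
  simp only [List.any_eq_true, List.mem_range, beq_iff_eq]
  exact ⟨0, by omega, rfl⟩

theorem pvDist_zero (parent : List Int) : pvDist parent 0 = 0 := by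
  unfold pvDist
  rw [dif_pos (pvReaches_zero parent)]
  rw [Nat.find_eq_zero]
  rfl

theorem pvDist_spec (parent : List Int) (x : Nat) (h : pvReaches parent x = true) :
    (pvNp parent)^[pvDist parent x] x = 0 ∧
      ∀ k < pvDist parent x, (pvNp parent)^[k] x ≠ 0 := by
  unfold pvDist
  rw [dif_pos h]
  exact ⟨Nat.find_spec (pvReaches_imp parent x h),
    fun k hk => Nat.find_min (pvReaches_imp parent x h) hk⟩

-- pigeonhole: the shortest chain from a reachable node has distinct nodes all < n
theorem pvDist_lt (parent : List Int)
    (Hp : ∀ i : Nat, i < parent.length → 1 ≤ i →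
      -(parent.length : Int) ≤ parent.getD i 0 ∧ parent.getD i 0 < (parent.length : Int))
    (x : Nat) (hx : x < parent.length) (hr : pvReaches parent x = true) :
    pvDist parent x + 1 ≤ parent.length := by
  obtain ⟨hP, hmin⟩ := pvDist_spec parent x hr
  set d := pvDist parent x with hd
  set f := pvNp parent with hf
  have hlt : ∀ i, i ≤ d → f^[i] x < parent.length := by
    intro i
    induction i with
    | zero => intro _; simpa using hx
    | succ i ih =>
      intro hi
      have h1 : f^[i] x < parent.length := ih (by omega)
      have h2 : f^[i] x ≠ 0 := hmin i (by omega)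
      rw [Function.iterate_succ_apply']
      exact pvNp_lt parent Hp _ (by omega) h1
  have key : ∀ a b : Nat, a < b → b ≤ d → f^[a] x = f^[b] x → False := by
    intro a b hab hbd he
    have h1 : f^[(d - b) + b] x = 0 := by
      rw [show (d - b) + b = d by omega]; exact hP
    rw [Function.iterate_add_apply, ← he, ← Function.iterate_add_apply] at h1
    exact hmin (d - b + a) (by omega) h1
  have hinj : Set.InjOn (fun i => f^[i] x) ↑(Finset.range (d + 1)) := by
    intro a ha b hb he
    simp only [Finset.coe_range, Set.mem_Iio] at ha hb
    rcases lt_trichotomy a b with h | h | h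
    · exact absurd he (fun he => key a b h (by omega) he)
    · exact h
    · exact absurd he.symm (fun he => key b a h (by omega) he)
  have hmaps : ∀ i ∈ Finset.range (d + 1), (fun i => f^[i] x) i ∈ Finset.range parent.length := by
    intro i hi
    simp only [Finset.mem_range] at hi ⊢
    exact hlt i (by omega)
  have := Finset.card_le_card_of_injOn _ hmaps hinj
  simpa using this

theorem pvDist_child (parent : List Int)
    (Hp : ∀ i : Nat, i < parent.length → 1 ≤ i →
      -(parent.length : Int) ≤ parent.getD i 0 ∧ parent.getD i 0 < (parent.length : Int))
    (x j : Nat) (hx : x < parent.length) (hrx : pvReaches parent x = true)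
    (hj1 : 1 ≤ j) (hjn : j < parent.length) (hpar : pvNp parent j = x) :
    pvReaches parent j = true ∧ pvDist parent j = pvDist parent x + 1 := by
  obtain ⟨hP, hmin⟩ := pvDist_spec parent x hrx
  have hdn := pvDist_lt parent Hp x hx hrx
  set d := pvDist parent x with hd
  have hstep : ∀ k : Nat, (pvNp parent)^[k + 1] j = (pvNp parent)^[k] x := by
    intro k
    rw [Function.iterate_succ_apply, hpar]
  have hrj : pvReaches parent j = true := by
    unfold pvReaches
    simp only [List.any_eq_true, List.mem_range, beq_iff_eq]
    exact ⟨d + 1, by omega, by rw [hstep]; exact hP⟩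
  refine ⟨hrj, ?_⟩
  unfold pvDist
  rw [dif_pos hrj]
  rw [Nat.find_eq_iff]
  constructor
  · rw [hstep]; exact hP
  · intro m hm
    match m with
    | 0 => simpa using (by omega : j ≠ 0)
    | m + 1 => rw [hstep]; exact hmin m (by omega)

theorem pvBuild_aux (parent : List Int)
    (Hp : ∀ i : Nat, i < parent.length → 1 ≤ i →
      -(parent.length : Int) ≤ parent.getD i 0 ∧ parent.getD i 0 < (parent.length : Int)) :
    ∀ k : Nat, k ≤ parent.length →
      ((PySem.List.pyRange 1 (k : Int) 1).foldl
        (fun g i => g.modify (pvNp parent i.toNat) (fun l => l ++ [i]))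
        (List.replicate parent.length ([] : List Int))).length = parent.length ∧
      ∀ x : Nat, x < parent.length →
        ((PySem.List.pyRange 1 (k : Int) 1).foldl
          (fun g i => g.modify (pvNp parent i.toNat) (fun l => l ++ [i]))
          (List.replicate parent.length ([] : List Int))).getD x []
        = ((List.range' 1 (k - 1)).filter
            (fun j => pvNp parent j == x)).map (fun j => ((j : Nat) : Int)) := by
  intro k
  induction k with
  | zero =>
    intro _
    rw [show ((0:Nat) : Int) = 0 by norm_num, PySem.List.pyRange_one_eq_nil (by norm_num)]
    refine ⟨by simp, ?_⟩
    intro x hx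
    simp
  | succ k ih =>
    intro hk
    rcases Nat.eq_zero_or_pos k with hk0 | hk1
    · subst hk0
      rw [show ((1:Nat) : Int) = 1 by norm_num, PySem.List.pyRange_one_eq_nil (by norm_num)]
      refine ⟨by simp, ?_⟩
      intro x hx
      simp
    · have ihk := ih (by omega)
      have hrng : PySem.List.pyRange 1 ((k + 1 : Nat) : Int) 1
          = PySem.List.pyRange 1 (k : Int) 1 ++ [(k : Int)] := by
        push_cast
        exact PySem.List.pyRange_one_succ_right (by exact_mod_cast hk1)
      rw [hrng, List.foldl_append]
      set F := (PySem.List.pyRange 1 (k : Int) 1).foldl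
        (fun g i => g.modify (pvNp parent i.toNat) (fun l => l ++ [i]))
        (List.replicate parent.length ([] : List Int)) with hF
      have hlen : F.length = parent.length := ihk.1
      have hstep : [(k : Int)].foldl
          (fun g i => g.modify (pvNp parent i.toNat) (fun l => l ++ [i])) F
          = F.modify (pvNp parent k) (fun l => l ++ [(k : Int)]) := by
        simp
      rw [hstep]
      set p := pvNp parent k with hp
      have hplt : p < parent.length := pvNp_lt parent Hp k hk1 (by omega)
      refine ⟨by simp [hlen], ?_⟩
      intro x hx
      have hxF : x < F.length := by omega
      have hmod : (F.modify p (fun l => l ++ [(k : Int)])).getD x []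
          = if p = x then F.getD x [] ++ [(k : Int)] else F.getD x [] := by
        rw [List.getD_eq_getElem?_getD, List.getElem?_modify, List.getElem?_eq_getElem hxF]
        by_cases h : p = x <;> simp [h, List.getD_eq_getElem?_getD, List.getElem?_eq_getElem hxF]
      have hsplit : ((List.range' 1 (k + 1 - 1)).filter
            (fun j => pvNp parent j == x)).map (fun j => ((j : Nat) : Int))
          = ((List.range' 1 (k - 1)).filter
              (fun j => pvNp parent j == x)).map (fun j => ((j : Nat) : Int))
            ++ (if pvNp parent k == x then [((k : Nat) : Int)] else []) := by
        have hk' : k + 1 - 1 = (k - 1) + 1 := by omega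
        rw [hk', List.range'_concat, show 1 + 1 * (k - 1) = k by omega,
            List.filter_append, List.map_append]
        simp only [List.filter_cons, List.filter_nil]
        split <;> simp
      rw [hmod, hsplit, ← ihk.2 x hx]
      rcases eq_or_ne p x with hpx | hpx
      · rw [if_pos hpx, if_pos (by rw [beq_iff_eq, ← hp, hpx])]
      · rw [if_neg hpx,
            if_neg (by rw [beq_iff_eq]; intro hcon; exact hpx (by rw [hp, hcon]))]
        simp

theorem pvBuildG_getD (parent : List Int)
    (Hp : ∀ i : Nat, i < parent.length → 1 ≤ i →
      -(parent.length : Int) ≤ parent.getD i 0 ∧ parent.getD i 0 < (parent.length : Int))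
    (x : Nat) (hx : x < parent.length) :
    (pvBuildG parent).getD x []
      = ((List.range' 1 (parent.length - 1)).filter
          (fun j => pvNp parent j == x)).map (fun j => ((j : Nat) : Int)) :=
  (pvBuild_aux parent Hp parent.length le_rfl).2 x hx

theorem pvGMem (parent : List Int)
    (Hp : ∀ i : Nat, i < parent.length → 1 ≤ i →
      -(parent.length : Int) ≤ parent.getD i 0 ∧ parent.getD i 0 < (parent.length : Int))
    (x : Nat) (hx : x < parent.length) (y : Int)
    (hy : y ∈ (pvBuildG parent).getD x []) :
    ∃ j : Nat, y = (j : Int) ∧ 1 ≤ j ∧ j < parent.length ∧ pvNp parent j = x := by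
  rw [pvBuildG_getD parent Hp x hx] at hy
  simp only [List.mem_map, List.mem_filter, List.mem_range'] at hy
  obtain ⟨j, ⟨⟨i, hi, hij⟩, hbe⟩, rfl⟩ := hy
  exact ⟨j, rfl, by omega, by omega, beq_iff_eq.1 hbe⟩

theorem pvGLen (parent : List Int)
    (Hp : ∀ i : Nat, i < parent.length → 1 ≤ i →
      -(parent.length : Int) ≤ parent.getD i 0 ∧ parent.getD i 0 < (parent.length : Int))
    (x : Nat) (hx : x < parent.length) :
    ((pvBuildG parent).getD x []).length ≤ parent.length - 1 := by
  rw [pvBuildG_getD parent Hp x hx, List.length_map]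
  calc (((List.range' 1 (parent.length - 1)).filter (fun j => pvNp parent j == x))).length
      ≤ (List.range' 1 (parent.length - 1)).length := List.length_filter_le _ _
    _ = parent.length - 1 := by simp

-- fuel accounting: processing node x costs < (2n+3)^(n - dist x)
theorem pvGW (parent : List Int)
    (Hp : ∀ i : Nat, i < parent.length → 1 ≤ i →
      -(parent.length : Int) ≤ parent.getD i 0 ∧ parent.getD i 0 < (parent.length : Int))
    (x : Nat) (hx : x < parent.length) (hrx : pvReaches parent x = true) :
    2 * (((pvBuildG parent).getD x []).map
        (fun y => (2 * parent.length + 3) ^ (parent.length - pvDist parent y.toNat))).sum + 3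
      ≤ (2 * parent.length + 3) ^ (parent.length - pvDist parent x) := by
  set n := parent.length with hn
  set d := pvDist parent x with hd
  have hdn : d + 1 ≤ n := pvDist_lt parent Hp x hx hrx
  set B := (2 * n + 3) ^ (n - d - 1) with hB
  have hall : ∀ a ∈ ((pvBuildG parent).getD x []).map
      (fun y => (2 * n + 3) ^ (n - pvDist parent y.toNat)), a = B := by
    intro a ha
    rw [List.mem_map] at ha
    obtain ⟨y, hy, rfl⟩ := ha
    obtain ⟨j, rfl, hj1, hjn, hpar⟩ := pvGMem parent Hp x hx y hy
    have hcd := pvDist_child parent Hp x j hx hrx hj1 hjn hpar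
    simp only [Int.toNat_natCast]
    rw [hcd.2, hB, ← hd]
    congr 1
  have hsum : (((pvBuildG parent).getD x []).map
      (fun y => (2 * n + 3) ^ (n - pvDist parent y.toNat))).sum
      = (((pvBuildG parent).getD x []).length) * B := by
    rw [List.sum_eq_card_nsmul _ B hall]
    simp
  rw [hsum]
  have hL : ((pvBuildG parent).getD x []).length ≤ n - 1 := pvGLen parent Hp x hx
  have hB1 : 1 ≤ B := Nat.one_le_pow _ _ (by omega)
  have hpow : (2 * n + 3) ^ (n - d) = (2 * n + 3) * B := by
    rw [hB, ← pow_succ']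
    congr 1
    omega
  rw [hpow]
  set L := ((pvBuildG parent).getD x []).length
  calc 2 * (L * B) + 3 ≤ 2 * ((n - 1) * B) + 3 * B := by
        linarith [Nat.mul_le_mul_right B hL, hB1]
    _ = (2 * (n - 1) + 3) * B := by ring
    _ = (2 * n + 1) * B := by rw [show 2 * (n - 1) + 3 = 2 * n + 1 from by omega]
    _ ≤ (2 * n + 3) * B := Nat.mul_le_mul_right B (by omega)

-- A's loop body applied to one child, phrased the way B's exit step computes it
def pvStepA (g : List (List Int)) (cs : List Char) (parent : List Int) (fa : Nat)
    (st : PySem.Dict Char Int × List Int) (x : Nat) : PySem.Dict Char Int × List Int :=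
  let st1 := pvDfsA g cs fa x st
  if x ≠ 0 then
    let res := PySem.Dict.getD st1.1 (cs.getD x ' ') (-1)
    let tgt := if res < 0 then pvNp parent x else res.toNat
    (st1.1, st1.2.set tgt (st1.2.getD tgt 0 + st1.2.getD x 0))
  else st1

theorem pvSIML (parent : List Int) (cs : List Char) (m fa' : Nat)
    (IH : ∀ x : Nat, x < parent.length → pvReaches parent x = true →
      parent.length - pvDist parent x ≤ m →
      ∀ (v : Int) (K : List (Bool × Int × Int)) (ch : PySem.Dict Char Int) (ans : List Int)
        (fa fb : Nat), parent.length - pvDist parent x ≤ fa →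
        (2 * parent.length + 3) ^ (parent.length - pvDist parent x) ≤ fb →
        ∃ fb', fb - (2 * parent.length + 3) ^ (parent.length - pvDist parent x) ≤ fb' ∧
          pvLoopB (pvBuildG parent) cs parent fb (((false : Bool), (x : Int), v) :: K) ch ans
            = pvLoopB (pvBuildG parent) cs parent fb' K
                (pvStepA (pvBuildG parent) cs parent fa (ch, ans) x).1
                (pvStepA (pvBuildG parent) cs parent fa (ch, ans) x).2) :
    ∀ ys : List Int,
      (∀ y ∈ ys, ∃ j : Nat, y = (j : Int) ∧ j < parent.length ∧
        pvReaches parent j = true ∧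
        parent.length - pvDist parent j ≤ m ∧ parent.length - pvDist parent j ≤ fa') →
      ∀ (K : List (Bool × Int × Int)) (ch : PySem.Dict Char Int) (ans : List Int) (fb : Nat),
        (ys.map (fun y => (2 * parent.length + 3) ^ (parent.length - pvDist parent y.toNat))).sum ≤ fb →
        ∃ fb', fb - (ys.map (fun y => (2 * parent.length + 3) ^ (parent.length - pvDist parent y.toNat))).sum ≤ fb' ∧
          pvLoopB (pvBuildG parent) cs parent fb
              (ys.map (fun y => ((false : Bool), y, (-1 : Int))) ++ K) ch ans
            = pvLoopB (pvBuildG parent) cs parent fb' K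
                (ys.foldl (fun st y => pvStepA (pvBuildG parent) cs parent fa' st y.toNat)
                  (ch, ans)).1
                (ys.foldl (fun st y => pvStepA (pvBuildG parent) cs parent fa' st y.toNat)
                  (ch, ans)).2 := by
  intro ys
  induction ys with
  | nil =>
    intro _ K ch ans fb _
    exact ⟨fb, by omega, rfl⟩
  | cons y ys' ihys =>
    intro hys K ch ans fb hfb
    obtain ⟨j, rfl, hjn, hjr, hjm, hjfa⟩ := hys y (List.mem_cons_self)
    simp only [List.map_cons, List.sum_cons, Int.toNat_natCast] at hfb ⊢
    have hP : (2 * parent.length + 3) ^ (parent.length - pvDist parent j) ≤ fb := by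
      have : 0 ≤ (ys'.map (fun y =>
        (2 * parent.length + 3) ^ (parent.length - pvDist parent y.toNat))).sum := Nat.zero_le _
      omega
    obtain ⟨fb1, hfb1, e1⟩ := IH j hjn hjr hjm (-1)
      (ys'.map (fun y => ((false : Bool), y, (-1 : Int))) ++ K) ch ans fa' fb hjfa hP
    have hys' : ∀ y ∈ ys', ∃ j : Nat, y = (j : Int) ∧ j < parent.length ∧
        pvReaches parent j = true ∧
        parent.length - pvDist parent j ≤ m ∧ parent.length - pvDist parent j ≤ fa' :=
      fun y hy => hys y (List.mem_cons_of_mem _ hy)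
    set S1 := pvStepA (pvBuildG parent) cs parent fa' (ch, ans) j with hS1
    have hfb1' : (ys'.map (fun y =>
        (2 * parent.length + 3) ^ (parent.length - pvDist parent y.toNat))).sum ≤ fb1 := by omega
    obtain ⟨fb', hfb', e2⟩ := ihys hys' K S1.1 S1.2 fb1 hfb1'
    refine ⟨fb', by omega, ?_⟩
    rw [List.cons_append, e1]
    have hfold : (((j : Int)) :: ys').foldl
        (fun st y => pvStepA (pvBuildG parent) cs parent fa' st y.toNat) (ch, ans)
        = ys'.foldl (fun st y => pvStepA (pvBuildG parent) cs parent fa' st y.toNat) S1 := by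
      rw [List.foldl_cons]
      simp only [Int.toNat_natCast]
      rw [hS1]
    rw [hfold]
    exact e2

theorem pvSIM (parent : List Int) (cs : List Char)
    (Hp : ∀ i : Nat, i < parent.length → 1 ≤ i →
      -(parent.length : Int) ≤ parent.getD i 0 ∧ parent.getD i 0 < (parent.length : Int)) :
    ∀ (m x : Nat), x < parent.length → pvReaches parent x = true →
      parent.length - pvDist parent x ≤ m →
    ∀ (v : Int) (K : List (Bool × Int × Int)) (ch : PySem.Dict Char Int) (ans : List Int)
      (fa fb : Nat), parent.length - pvDist parent x ≤ fa →
      (2 * parent.length + 3) ^ (parent.length - pvDist parent x) ≤ fb →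
      ∃ fb', fb - (2 * parent.length + 3) ^ (parent.length - pvDist parent x) ≤ fb' ∧
        pvLoopB (pvBuildG parent) cs parent fb (((false : Bool), (x : Int), v) :: K) ch ans
          = pvLoopB (pvBuildG parent) cs parent fb' K
              (pvStepA (pvBuildG parent) cs parent fa (ch, ans) x).1
              (pvStepA (pvBuildG parent) cs parent fa (ch, ans) x).2 := by
  intro m
  induction m with
  | zero =>
    intro x hx hrx hm
    have := pvDist_lt parent Hp x hx hrx
    omega
  | succ m ihm =>
    intro x hx hrx hm v K ch ans fa fb hfa hfb
    have hdn : pvDist parent x + 1 ≤ parent.length := pvDist_lt parent Hp x hx hrx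
    have hx1 : 1 ≤ parent.length - pvDist parent x := by omega
    obtain ⟨fa', rfl⟩ : ∃ fa', fa = fa' + 1 := ⟨fa - 1, by omega⟩
    have hpow3 : (2 * parent.length + 3) ^ 1
        ≤ (2 * parent.length + 3) ^ (parent.length - pvDist parent x) :=
      Nat.pow_le_pow_right (by omega) (by omega)
    have hfb3 : 3 ≤ fb := by
      have : 2 * parent.length + 3 ≤ (2 * parent.length + 3) ^ 1 := by norm_num
      omega
    obtain ⟨fb0, rfl⟩ : ∃ t, fb = t + 1 := ⟨fb - 1, by omega⟩
    -- unfold B's enter step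
    have henter : pvLoopB (pvBuildG parent) cs parent (fb0 + 1)
          (((false : Bool), (x : Int), v) :: K) ch ans
        = pvLoopB (pvBuildG parent) cs parent fb0
            (((pvBuildG parent).getD x []).map (fun y => ((false : Bool), y, (-1 : Int))) ++
              ((true : Bool), (x : Int), PySem.Dict.getD ch (cs.getD x ' ') (-1)) :: K)
            (PySem.Dict.insert ch (cs.getD x ' ') ((x : Nat) : Int)) ans := by
      simp [pvLoopB]
    have hch : ∀ y ∈ (pvBuildG parent).getD x [], ∃ j : Nat, y = (j : Int) ∧
        j < parent.length ∧ pvReaches parent j = true ∧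
        parent.length - pvDist parent j ≤ m ∧ parent.length - pvDist parent j ≤ fa' := by
      intro y hy
      obtain ⟨j, rfl, hj1, hjn, hpar⟩ := pvGMem parent Hp x hx y hy
      obtain ⟨hrj, hdj⟩ := pvDist_child parent Hp x j hx hrx hj1 hjn hpar
      exact ⟨j, rfl, hjn, hrj, by omega, by omega⟩
    have hW := pvGW parent Hp x hx hrx
    have hWfb : (((pvBuildG parent).getD x []).map
        (fun y => (2 * parent.length + 3) ^ (parent.length - pvDist parent y.toNat))).sum
        ≤ fb0 := by omega
    obtain ⟨fb2, hfb2, e2⟩ := pvSIML parent cs m fa' ihm ((pvBuildG parent).getD x []) hch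
      (((true : Bool), (x : Int), PySem.Dict.getD ch (cs.getD x ' ') (-1)) :: K)
      (PySem.Dict.insert ch (cs.getD x ' ') ((x : Nat) : Int)) ans fb0 hWfb
    set S := ((pvBuildG parent).getD x []).foldl
      (fun st y => pvStepA (pvBuildG parent) cs parent fa' st y.toNat)
      (PySem.Dict.insert ch (cs.getD x ' ') ((x : Nat) : Int), ans) with hS
    have hfb2' : 2 ≤ fb2 := by omega
    obtain ⟨fb3, rfl⟩ : ∃ t, fb2 = t + 1 := ⟨fb2 - 1, by omega⟩
    -- A's dfs at x equals the fold of per-child steps, wrapped with the final restore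
    have hcongr : ((pvBuildG parent).getD x []).foldl
        (fun st y =>
          ((pvDfsA (pvBuildG parent) cs fa' y.toNat st).1,
            (pvDfsA (pvBuildG parent) cs fa' y.toNat st).2.set
              (if (pvDfsA (pvBuildG parent) cs fa' y.toNat st).1.getD (cs.getD y.toNat ' ') (-1) < 0
                then x
                else ((pvDfsA (pvBuildG parent) cs fa' y.toNat st).1.getD (cs.getD y.toNat ' ') (-1)).toNat)
              ((pvDfsA (pvBuildG parent) cs fa' y.toNat st).2.getD
                  (if (pvDfsA (pvBuildG parent) cs fa' y.toNat st).1.getD (cs.getD y.toNat ' ') (-1) < 0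
                    then x
                    else ((pvDfsA (pvBuildG parent) cs fa' y.toNat st).1.getD (cs.getD y.toNat ' ') (-1)).toNat)
                  0
                + (pvDfsA (pvBuildG parent) cs fa' y.toNat st).2.getD y.toNat 0)))
        (PySem.Dict.insert ch (cs.getD x ' ') ((x : Nat) : Int), ans) = S := by
      rw [hS]
      apply PySem.List.foldl_congr_mem
      intro acc y hy
      obtain ⟨j, rfl, hj1, _hjn, hpar⟩ := pvGMem parent Hp x hx y hy
      simp only [Int.toNat_natCast]
      unfold pvStepA
      have hjne : j ≠ 0 := by omega
      rw [if_pos hjne]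
      have htgt : (if (pvDfsA (pvBuildG parent) cs fa' j acc).1.getD
            (cs.getD j ' ') (-1) < 0 then x
          else ((pvDfsA (pvBuildG parent) cs fa' j acc).1.getD
            (cs.getD j ' ') (-1)).toNat)
          = (if (pvDfsA (pvBuildG parent) cs fa' j acc).1.getD
                (cs.getD j ' ') (-1) < 0 then pvNp parent j
              else ((pvDfsA (pvBuildG parent) cs fa' j acc).1.getD
                (cs.getD j ' ') (-1)).toNat) := by
        rw [hpar]
      simp only [htgt]
    have hstep1 : pvDfsA (pvBuildG parent) cs (fa' + 1) x (ch, ans)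
        = (PySem.Dict.insert S.1 (cs.getD x ' ') (PySem.Dict.getD ch (cs.getD x ' ') (-1)),
           S.2) := by
      conv_lhs => rw [pvDfsA]
      simp only [Int.ofNat_eq_natCast]
      rw [hcongr]
    by_cases hx0 : x = 0
    · subst hx0
      have hexit : pvLoopB (pvBuildG parent) cs parent (fb3 + 1)
            (((true : Bool), ((0 : Nat) : Int), PySem.Dict.getD ch (cs.getD 0 ' ') (-1)) :: K)
            S.1 S.2
          = pvLoopB (pvBuildG parent) cs parent fb3 K
              (PySem.Dict.insert S.1 (cs.getD 0 ' ')
                (PySem.Dict.getD ch (cs.getD 0 ' ') (-1))) S.2 := by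
        simp [pvLoopB]
      refine ⟨fb3, by omega, ?_⟩
      rw [henter, e2, hexit]
      unfold pvStepA
      rw [hstep1]
      simp
    · have hexit : pvLoopB (pvBuildG parent) cs parent (fb3 + 1)
            (((true : Bool), ((x : Nat) : Int), PySem.Dict.getD ch (cs.getD x ' ') (-1)) :: K)
            S.1 S.2
          = pvLoopB (pvBuildG parent) cs parent fb3 K
              (PySem.Dict.insert S.1 (cs.getD x ' ')
                (PySem.Dict.getD ch (cs.getD x ' ') (-1)))
              (S.2.set
                (if PySem.Dict.getD ch (cs.getD x ' ') (-1) < 0 then pvNp parent x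
                  else (PySem.Dict.getD ch (cs.getD x ' ') (-1)).toNat)
                (S.2.getD
                  (if PySem.Dict.getD ch (cs.getD x ' ') (-1) < 0 then pvNp parent x
                    else (PySem.Dict.getD ch (cs.getD x ' ') (-1)).toNat) 0
                  + S.2.getD x 0)) := by
        simp [pvLoopB, hx0]
      refine ⟨fb3, by omega, ?_⟩
      rw [henter, e2, hexit]
      unfold pvStepA
      rw [hstep1]
      simp [hx0]

-- ===== VERDICT (by name: the statement is the Claim_ definition above) =====
theorem findSubtreeSizes_spec : Claim_equal_findSubtreeSizes := by
  intro parent s hdom hpre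
  obtain ⟨hne, Hp, _⟩ := hpre
  unfold Spec_findSubtreeSizes
  have hn : 0 < parent.length := List.length_pos_iff.2 hne
  obtain ⟨fb', hfb', e⟩ := pvSIM parent s.toList Hp parent.length 0 hn
    (pvReaches_zero parent) (by rw [pvDist_zero]; omega) (-1) []
    PySem.Dict.empty (List.replicate parent.length (1 : Int)) parent.length
    ((2 * parent.length + 3) ^ parent.length)
    (by rw [pvDist_zero]; omega) (by rw [pvDist_zero, Nat.sub_zero])
  simp only [Nat.cast_zero] at e
  show (pvDfsA (pvBuildG parent) s.toList parent.length 0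
      (PySem.Dict.empty, List.replicate parent.length 1)).2
    = pvLoopB (pvBuildG parent) s.toList parent ((2 * parent.length + 3) ^ parent.length)
        [((false : Bool), 0, -1)] PySem.Dict.empty (List.replicate parent.length 1)
  rw [e, pvLoopB_nil]
  simp [pvStepA]
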